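-- pv_equiv track=rewrite | github.com/JustDoPython/python-examples | moumoubaimifan/bilibili/bilibili.py | algorithm_enc
-- ===== SOURCE A (Python) =====
-- Str = 'fZodR9XQDSUm21yCkr6zBqiveYah8bt4xsWpHnJE7jL5VG3guMTKNPAwcF'  # 准备的一串指定字符串
--
-- s = [11, 10, 3, 8, 4, 6, 2, 9, 5, 7]  # 必要的解密列表
--
-- xor = 177451812
--
-- add = 100618342136696320  # 这串数字最后要被减去或加上
--
-- def algorithm_enc(av):
--     ret = av
--     av = int(av)
--     av = (av ^ xor) + add
--     # 将BV号的格式（BV + 10个字符） 转化成列表方便后面的操作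
--     r = list('BV          ')
--     for i in range(10):
--         r[s[i]] = Str[av // 58 ** i % 58]
--     return ''.join(r)
-- ===== SOURCE B (Python) =====
-- Str = 'fZodR9XQDSUm21yCkr6zBqiveYah8bt4xsWpHnJE7jL5VG3guMTKNPAwcF'
--
-- s = [11, 10, 3, 8, 4, 6, 2, 9, 5, 7]
--
-- xor = 177451812
--
-- add = 100618342136696320
--
-- def algorithm_enc(av):
--     # No template list and no scatter: pair each base-58 digit character with
--     # its target position recursively (running quotient), then sort the pairs
--     # by position and concatenate after the fixed 'BV' prefix.
--     def pairs(n, positions):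
--         if not positions:
--             return []
--         return [(positions[0], Str[n % 58])] + pairs(n // 58, positions[1:])
--     return 'BV' + ''.join(c for _, c in sorted(pairs((int(av) ^ xor) + add, s)))
-- ===== Notes on version B (the rewrite author's own statement) =====
-- stated objective: alternative
-- what changed: B replaces A's scatter into a mutable fixed-size template (one independent power-of-58 digit formula per slot) by a recursive running-quotient extraction that pairs each digit character with its target position and then sorts the pairs by position before concatenating after the fixed 'BV' prefix.
import Mathlib
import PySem

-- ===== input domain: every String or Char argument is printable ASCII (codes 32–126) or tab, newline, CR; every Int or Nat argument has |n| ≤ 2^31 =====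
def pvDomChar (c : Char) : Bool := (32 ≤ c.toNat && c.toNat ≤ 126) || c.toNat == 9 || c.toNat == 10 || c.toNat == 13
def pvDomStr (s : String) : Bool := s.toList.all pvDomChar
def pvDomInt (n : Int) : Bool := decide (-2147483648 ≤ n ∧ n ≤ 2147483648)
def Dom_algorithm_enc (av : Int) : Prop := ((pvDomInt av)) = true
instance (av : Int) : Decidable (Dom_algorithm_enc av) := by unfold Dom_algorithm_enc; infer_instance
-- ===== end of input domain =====

-- B builds (position, digit-char) pairs recursively with a running quotient and
-- sorts them by position, instead of A's scatter into a mutable template list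
-- with an independent power-of-58 formula per digit.

def pvStr : List Char := "fZodR9XQDSUm21yCkr6zBqiveYah8bt4xsWpHnJE7jL5VG3guMTKNPAwcF".toList

def pvs : List Int := [11, 10, 3, 8, 4, 6, 2, 9, 5, 7]

def pvXor : Int := 177451812

def pvAdd : Int := 100618342136696320

-- ===== PORT A =====
-- the list indices are always in range (s[i] lands inside the template, the
-- Str index is … % 58 ∈ [0,58)), so the total pySetD/pyGetD forms are exact
def algorithm_enc (av : Int) : String :=
  let av1 : Int := PySem.Int.bxor av pvXor + pvAdd
  let r0 : List Char := "BV          ".toList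
  let r := (List.range 10).foldl
    (fun (r : List Char) (i : Nat) => PySem.List.pySetD r (PySem.List.pyGetD pvs (i : Int) 0)
      (PySem.List.pyGetD pvStr (PySem.Int.mod (PySem.Int.floordiv av1 (58 ^ i)) 58) ' ')) r0
  String.ofList r

-- ===== PORT B =====
-- Source B's inner recursion `pairs(n, positions)`
def pvPairs : Int → List Int → List (Int × Char)
  | _, [] => []
  | n, p :: ps =>
      (p, PySem.List.pyGetD pvStr (PySem.Int.mod n 58) ' ') ::
        pvPairs (PySem.Int.floordiv n 58) ps

-- Python's sorted on the tuples compares first components alone here, since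
-- the positions in pvs are pairwise distinct
def algorithm_enc_alt (av : Int) : String :=
  String.ofList ("BV".toList ++
    (PySem.List.sorted (pvPairs (PySem.Int.bxor av pvXor + pvAdd) pvs)
      (fun p => p.1) false).map Prod.snd)

-- ===== PRECONDITION & SPEC =====
def Spec_algorithm_enc (av : Int) (out : String) : Prop := out = algorithm_enc_alt av
instance (av : Int) (out : String) : Decidable (Spec_algorithm_enc av out) := by unfold Spec_algorithm_enc; infer_instance

-- ===== CLAIM (what is proved, stated in full; the proofs are below) =====
def Claim_equal_algorithm_enc : Prop := ∀ (av : Int), Dom_algorithm_enc av → Spec_algorithm_enc av (algorithm_enc av)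

-- ===== LEMMAS AND PROOFS =====

-- the digit character at weight 58^i
def pvG (n : Int) (i : Nat) : Char :=
  PySem.List.pyGetD pvStr (PySem.Int.mod (PySem.Int.floordiv n (58 ^ i)) 58) ' '

-- A's scatter fold, evaluated on the literal positions
lemma pv_A (n : Int) :
    (List.range 10).foldl
      (fun (r : List Char) (i : Nat) => PySem.List.pySetD r (PySem.List.pyGetD pvs (i : Int) 0)
        (PySem.List.pyGetD pvStr (PySem.Int.mod (PySem.Int.floordiv n (58 ^ i)) 58) ' ')) "BV          ".toList
    = ['B','V', pvG n 6, pvG n 2, pvG n 4, pvG n 8, pvG n 5, pvG n 9, pvG n 3, pvG n 7, pvG n 1, pvG n 0] := by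
  simp [List.range_succ, PySem.List.pySetD, PySem.List.pySet?, PySem.List.pyIdx?, pvs, pvG]

-- B's running-quotient recursion produces the same digits, power form
lemma pv_pairs (n : Int) :
    pvPairs n pvs
    = [(11, pvG n 0),(10, pvG n 1),(3, pvG n 2),(8, pvG n 3),(4, pvG n 4),
       (6, pvG n 5),(2, pvG n 6),(9, pvG n 7),(5, pvG n 8),(7, pvG n 9)] := by
  simp only [pvPairs, pvs, pvG]
  norm_num [Int.ediv_ediv_of_nonneg]

-- sorting the ten literal positions (the symbolic chars ride along)
set_option maxHeartbeats 1000000 in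
lemma pv_sorted (c0 c1 c2 c3 c4 c5 c6 c7 c8 c9 : Char) :
    PySem.List.sorted
      [((11:Int),c0),(10,c1),(3,c2),(8,c3),(4,c4),(6,c5),(2,c6),(9,c7),(5,c8),(7,c9)]
      (fun p => p.1) false
    = [(2,c6),(3,c2),(4,c4),(5,c8),(6,c5),(7,c9),(8,c3),(9,c7),(10,c1),(11,c0)] := by
  rfl

-- ===== VERDICT =====
theorem algorithm_enc_spec : Claim_equal_algorithm_enc := by
  intro av _
  show algorithm_enc av = algorithm_enc_alt av
  simp only [algorithm_enc, algorithm_enc_alt]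
  rw [pv_A, pv_pairs, pv_sorted]
  rfl
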